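-- pv_equiv track=rewrite | github.com/AaronOS0/leetcode_solver | Array/alter_elements.py | checkPossibility1
-- ===== SOURCE A (Python) =====
-- from typing import List
--
-- def checkPossibility1(nums: List[int]) -> bool:
--     nums_1, nums_2 = nums[:], nums[:]
--     # find the wrong order pair, either modify the first one or second one
--     for i in range(len(nums) - 1):
--         if nums[i] > nums[i + 1]:
--             nums_1[i] = nums[i + 1]
--             nums_2[i + 1] = nums[i]
--             break
--     return nums_1 == sorted(nums_1) or nums_2 == sorted(nums_2)
-- ===== SOURCE B (Python) =====
-- from typing import List
--
-- def checkPossibility1(nums: List[int]) -> bool: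
--     # At the first inversion, try deleting either offender and check the
--     # remainder is non-decreasing with a plain linear scan (no sorting).
--     def nondec(a):
--         return all(a[j] <= a[j + 1] for j in range(len(a) - 1))
--     for i in range(len(nums) - 1):
--         if nums[i] > nums[i + 1]:
--             return nondec(nums[:i] + nums[i + 1:]) or nondec(nums[:i + 1] + nums[i + 2:])
--     return True
-- ===== Notes on version B (the rewrite author's own statement) =====
-- stated objective: faster
-- what changed: Instead of copying the array twice, patching one element and comparing each copy with its sorted version, B stops at the first inversion and checks with a linear scan whether deleting either offending element leaves a non-decreasing list.
import Mathlib
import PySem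

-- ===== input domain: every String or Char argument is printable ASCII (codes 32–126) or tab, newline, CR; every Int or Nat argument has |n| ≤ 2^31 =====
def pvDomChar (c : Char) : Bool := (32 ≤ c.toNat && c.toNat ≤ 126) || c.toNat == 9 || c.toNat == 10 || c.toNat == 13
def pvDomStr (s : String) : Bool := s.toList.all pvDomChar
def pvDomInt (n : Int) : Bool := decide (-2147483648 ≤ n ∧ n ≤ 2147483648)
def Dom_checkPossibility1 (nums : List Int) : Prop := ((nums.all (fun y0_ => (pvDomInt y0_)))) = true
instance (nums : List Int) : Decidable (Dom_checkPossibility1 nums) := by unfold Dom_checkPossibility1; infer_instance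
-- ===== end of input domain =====

-- B replaces A's "patch one copy and compare with sorted()" by a linear scan that, at the
-- first inversion, checks whether deleting either offender leaves a non-decreasing list (faster).

-- ===== PORT A =====
-- A's for-loop with break: walk the index list, at the first inversion build the two patched copies.
def pvGoA (nums : List Int) : List Int → List Int × List Int
  | [] => (nums, nums)
  | i :: rest =>
    if PySem.List.pyGetD nums i 0 > PySem.List.pyGetD nums (i + 1) 0 then
      (PySem.List.pySetD nums i (PySem.List.pyGetD nums (i + 1) 0),
       PySem.List.pySetD nums (i + 1) (PySem.List.pyGetD nums i 0))
    else pvGoA nums rest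

def checkPossibility1 (nums : List Int) : Bool :=
  let p := pvGoA nums (PySem.List.pyRange 0 ((nums.length : Int) - 1) 1)
  decide (p.1 = PySem.List.sorted p.1 (fun x => x) false) ||
  decide (p.2 = PySem.List.sorted p.2 (fun x => x) false)

-- ===== PORT B =====
-- B's helper nondec: all(a[j] <= a[j+1] for j in range(len(a)-1))
def pvNondec (a : List Int) : Bool :=
  (PySem.List.pyRange 0 ((a.length : Int) - 1) 1).all
    (fun j => decide (PySem.List.pyGetD a j 0 ≤ PySem.List.pyGetD a (j + 1) 0))

-- B's for-loop with early return at the first inversion.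
def pvGoB (nums : List Int) : List Int → Bool
  | [] => true
  | i :: rest =>
    if PySem.List.pyGetD nums i 0 > PySem.List.pyGetD nums (i + 1) 0 then
      pvNondec (PySem.List.slice nums none (some i) ++ PySem.List.slice nums (some (i + 1)) none) ||
      pvNondec (PySem.List.slice nums none (some (i + 1)) ++ PySem.List.slice nums (some (i + 2)) none)
    else pvGoB nums rest

def checkPossibility1_alt (nums : List Int) : Bool :=
  pvGoB nums (PySem.List.pyRange 0 ((nums.length : Int) - 1) 1)

-- ===== PRECONDITION & SPEC =====
def Spec_checkPossibility1 (nums : List Int) (out : Bool) : Prop := out = checkPossibility1_alt nums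
instance (nums : List Int) (out : Bool) : Decidable (Spec_checkPossibility1 nums out) := by unfold Spec_checkPossibility1; infer_instance

-- ===== CLAIM (what is proved, stated in full; the proofs are below) =====
def Claim_equal_checkPossibility1 : Prop := ∀ (nums : List Int), Dom_checkPossibility1 nums → Spec_checkPossibility1 nums (checkPossibility1 nums)

-- ===== LEMMAS AND PROOFS =====

lemma pvPairwise_iff (l : List Int) :
    l.Pairwise (· ≤ ·) ↔ ∀ (i : Nat) (_ : i + 1 < l.length), l[i] ≤ l[i + 1] := by
  rw [← List.isChain_iff_pairwise, List.isChain_iff_getElem]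

lemma pvSortedEq_iff (l : List Int) :
    (l = PySem.List.sorted l (fun x => x) false) ↔ l.Pairwise (· ≤ ·) := by
  constructor
  · intro h
    have hp := PySem.List.sorted_pairwise l (fun x => x)
    rw [← h] at hp
    simpa using hp
  · intro h
    have := PySem.List.sorted_eq_self_of_pairwise l (fun x => x) (by simpa using h)
    exact this.symm

lemma pvNondec_iff (a : List Int) : pvNondec a = true ↔ a.Pairwise (· ≤ ·) := by
  unfold pvNondec
  rw [List.all_eq_true, pvPairwise_iff]
  constructor
  · intro h i hi
    have hm : (i : Int) ∈ PySem.List.pyRange 0 ((a.length : Int) - 1) 1 :=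
      PySem.List.mem_pyRange_one.mpr ⟨by omega, by omega⟩
    have hd := h _ hm
    rw [PySem.List.pyGetD_eq_getElem a 0 (by omega) (by omega),
        PySem.List.pyGetD_eq_getElem a 0 (by omega) (by omega)] at hd
    simp only [decide_eq_true_eq] at hd
    convert hd using 2
  · intro h j hj
    obtain ⟨hj0, hj1⟩ := PySem.List.mem_pyRange_one.mp hj
    rw [PySem.List.pyGetD_eq_getElem a 0 hj0 (by omega),
        PySem.List.pyGetD_eq_getElem a 0 (by omega) (by omega)]
    simp only [decide_eq_true_eq]
    have := h j.toNat (by omega)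
    convert this using 2
    omega

-- duplicating the pivot does not change non-decreasingness
lemma pvDup_iff (p r : List Int) (v : Int) :
    (p ++ v :: v :: r).Pairwise (· ≤ ·) ↔ (p ++ v :: r).Pairwise (· ≤ ·) := by
  simp only [List.pairwise_append, List.pairwise_cons, List.mem_cons]
  constructor
  · rintro ⟨hp, ⟨hv, hvr, hr⟩, hc⟩
    exact ⟨hp, ⟨hvr, hr⟩, fun x hx y hy => hc x hx y (by tauto)⟩
  · rintro ⟨hp, ⟨hvr, hr⟩, hc⟩
    refine ⟨hp, ⟨?_, hvr, hr⟩, fun x hx y hy => hc x hx y (by tauto)⟩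
    intro b hb
    rcases hb with rfl | hb
    · exact le_refl b
    · exact hvr b hb

-- the first inversion sits at i: A's patched copy is sorted iff B's deleted copy is non-decreasing
lemma pvBranch1 (nums : List Int) (i : Nat) (hi : i + 1 < nums.length) :
    decide (nums.set i nums[i + 1] =
      PySem.List.sorted (nums.set i nums[i + 1]) (fun x => x) false) =
    pvNondec (nums.take i ++ nums.drop (i + 1)) := by
  rw [Bool.eq_iff_iff]
  rw [decide_eq_true_eq, pvNondec_iff, pvSortedEq_iff]
  rw [List.set_eq_take_cons_drop _ (by omega), List.drop_eq_getElem_cons hi]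
  exact pvDup_iff _ _ _

lemma pvBranch2 (nums : List Int) (i : Nat) (hi : i + 1 < nums.length) :
    decide (nums.set (i + 1) (nums[i]'(by omega)) =
      PySem.List.sorted (nums.set (i + 1) (nums[i]'(by omega))) (fun x => x) false) =
    pvNondec (nums.take (i + 1) ++ nums.drop (i + 2)) := by
  rw [Bool.eq_iff_iff]
  rw [decide_eq_true_eq, pvNondec_iff, pvSortedEq_iff]
  rw [List.set_eq_take_cons_drop _ (by omega), show i + 1 + 1 = i + 2 from rfl,
      List.take_succ_eq_append_getElem (by omega)]
  simp only [List.append_assoc, List.singleton_append]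
  exact pvDup_iff (nums.take i) (nums.drop (i + 2)) (nums[i]'(by omega))

-- terminal case: the whole prefix scanned without inversion, so nums is non-decreasing
lemma pvTerminal (nums : List Int) (a : Nat) (ha : nums.length ≤ a + 1)
    (hpref : ∀ (j : Nat) (_ : j + 1 < nums.length), j < a → nums[j] ≤ nums[j + 1]) :
    nums.Pairwise (· ≤ ·) := by
  rw [pvPairwise_iff]
  intro j hj
  exact hpref j hj (by omega)

lemma pvNilCase (nums : List Int) (a : Nat) (ha : nums.length ≤ a + 1)
    (hpref : ∀ (j : Nat) (_ : j + 1 < nums.length), j < a → nums[j] ≤ nums[j + 1]) :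
    (decide ((pvGoA nums (PySem.List.pyRange (a : Int) ((nums.length : Int) - 1) 1)).1 =
        PySem.List.sorted (pvGoA nums (PySem.List.pyRange (a : Int) ((nums.length : Int) - 1) 1)).1 (fun x => x) false) ||
     decide ((pvGoA nums (PySem.List.pyRange (a : Int) ((nums.length : Int) - 1) 1)).2 =
        PySem.List.sorted (pvGoA nums (PySem.List.pyRange (a : Int) ((nums.length : Int) - 1) 1)).2 (fun x => x) false)) =
    pvGoB nums (PySem.List.pyRange (a : Int) ((nums.length : Int) - 1) 1) := by
  rw [PySem.List.pyRange_one_eq_nil (by omega)]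
  simp only [pvGoA, pvGoB]
  have e := (pvSortedEq_iff nums).mpr (pvTerminal nums a ha hpref)
  simp [← e]

lemma pvLoop_eq (nums : List Int) (fuel : Nat) : ∀ (a : Nat),
    nums.length ≤ a + 1 + fuel →
    (∀ (j : Nat) (_ : j + 1 < nums.length), j < a → nums[j] ≤ nums[j + 1]) →
    (decide ((pvGoA nums (PySem.List.pyRange (a : Int) ((nums.length : Int) - 1) 1)).1 =
        PySem.List.sorted (pvGoA nums (PySem.List.pyRange (a : Int) ((nums.length : Int) - 1) 1)).1 (fun x => x) false) ||
     decide ((pvGoA nums (PySem.List.pyRange (a : Int) ((nums.length : Int) - 1) 1)).2 =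
        PySem.List.sorted (pvGoA nums (PySem.List.pyRange (a : Int) ((nums.length : Int) - 1) 1)).2 (fun x => x) false)) =
    pvGoB nums (PySem.List.pyRange (a : Int) ((nums.length : Int) - 1) 1) := by
  induction fuel with
  | zero =>
    intro a hlen hpref
    exact pvNilCase nums a (by omega) hpref
  | succ f ih =>
    intro a hlen hpref
    by_cases h : (a : Int) < (nums.length : Int) - 1
    · rw [PySem.List.pyRange_one_cons h]
      have hi : a + 1 < nums.length := by omega
      have e1 : PySem.List.pyGetD nums (a : Int) 0 = nums[a]'(by omega) := by
        rw [PySem.List.pyGetD_eq_getElem nums 0 (by omega) (by omega)]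
        congr 1
      have e2 : PySem.List.pyGetD nums ((a : Int) + 1) 0 = nums[a + 1] := by
        rw [PySem.List.pyGetD_eq_getElem nums 0 (by omega) (by omega)]
        congr 1
      simp only [pvGoA, pvGoB, e1, e2]
      by_cases hgt : nums[a]'(by omega) > nums[a + 1]
      · simp only [if_pos hgt]
        have s1 : PySem.List.pySetD nums (a : Int) nums[a + 1] = nums.set a nums[a + 1] := by
          simp
        have s2 : PySem.List.pySetD nums ((a : Int) + 1) (nums[a]'(by omega)) =
            nums.set (a + 1) (nums[a]'(by omega)) := by
          rw [PySem.List.pySetD_of_nonneg nums _ (by omega)]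
          congr 1
        have t1 : PySem.List.slice nums none (some (a : Int)) = nums.take a :=
          PySem.List.slice_to_natCast nums a
        have t2 : PySem.List.slice nums (some ((a : Int) + 1)) none = nums.drop (a + 1) := by
          rw [PySem.List.slice_from nums (by omega)]
          congr 1
        have t3 : PySem.List.slice nums none (some ((a : Int) + 1)) = nums.take (a + 1) := by
          rw [PySem.List.slice_to nums (by omega)]
          congr 1
        have t4 : PySem.List.slice nums (some ((a : Int) + 2)) none = nums.drop (a + 2) := by
          rw [PySem.List.slice_from nums (by omega)]
          congr 1
        simp only [s1, s2, t1, t2, t3, t4]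
        rw [pvBranch1 nums a hi, pvBranch2 nums a hi]
      · simp only [if_neg hgt]
        have hc : ((a : Int) + 1) = (((a + 1 : Nat)) : Int) := by push_cast; ring
        rw [hc]
        refine ih (a + 1) (by omega) ?_
        intro j hj hja
        rcases Nat.lt_succ_iff_lt_or_eq.mp hja with hlt | rfl
        · exact hpref j hj hlt
        · omega
    · exact pvNilCase nums a (by omega) hpref

-- ===== VERDICT (by name: the statement is the Claim_ definition above) =====
theorem checkPossibility1_spec : Claim_equal_checkPossibility1 := by
  intro nums _
  unfold Spec_checkPossibility1 checkPossibility1 checkPossibility1_alt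
  have h := pvLoop_eq nums nums.length 0 (by omega) (by intro j hj hj0; omega)
  simpa using h
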